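-- pv_equiv track=rewrite | github.com/tiendm1991/python | DynamicPrograming/countDigitToSum.py | countDigitToSum
-- ===== SOURCE A (Python) =====
-- def countDigitToSum(n, s):
--     if n * 9 < s or s == 0:
--         return 0
--     dp = [[0 for i in range(s + 1)] for j in range(n + 1)]
--     for i in range(1, s + 1):
--         if i > 9:
--             break
--         dp[1][i] = 1
--     for i in range(2, n + 1):
--         for j in range(1, s + 1):
--             for k in range(10):
--                 if j >= k:
--                     dp[i][j] += dp[i - 1][j - k]
--                 else:
--                     break
--     return dp[n][s]
-- ===== SOURCE B (Python) =====
-- def countDigitToSum(n, s):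
--     if n <= 0 or s <= 0 or 9 * n < s:
--         return 0
--     # row[j] = count of t-digit strings (leading digit 1-9, rest 0-9) with digit sum j
--     row = [0] + [1] * min(9, s) + [0] * max(0, s - 9)
--     for _ in range(n - 1):
--         pref = [0]
--         for x in row:
--             pref.append(pref[-1] + x)
--         row = [pref[j + 1] - pref[max(0, j - 9)] for j in range(s + 1)]
--     return row[s]
-- ===== Notes on version B (the rewrite author's own statement) =====
-- stated objective: alternative
-- what changed: Replaces the (n+1)x(s+1) table with triple nested loops by a single rolling row updated via a prefix-sum sliding window, so the 10-way inner digit loop disappears and only O(s) space is kept.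
import Mathlib
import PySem

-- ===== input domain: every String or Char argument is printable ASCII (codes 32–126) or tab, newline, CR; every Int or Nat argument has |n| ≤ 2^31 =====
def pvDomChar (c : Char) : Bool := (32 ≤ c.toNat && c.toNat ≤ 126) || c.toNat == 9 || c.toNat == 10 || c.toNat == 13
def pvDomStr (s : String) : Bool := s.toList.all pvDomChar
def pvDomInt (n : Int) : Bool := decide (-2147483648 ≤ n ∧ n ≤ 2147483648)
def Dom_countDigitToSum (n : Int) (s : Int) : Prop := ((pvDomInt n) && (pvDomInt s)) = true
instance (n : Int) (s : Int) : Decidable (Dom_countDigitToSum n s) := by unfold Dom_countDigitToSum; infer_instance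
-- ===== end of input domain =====

-- B replaces A's (n+1)×(s+1) table with triple nested loops by a single rolling row
-- updated through a prefix-sum sliding window (objective: alternative — the 10-way inner
-- digit loop disappears and only O(s) space is kept).

-- ===== PORT A =====
-- inner `for k in range(10): if j >= k: dp[i][j] += dp[i-1][j-k] else: break`
-- (the += accumulation is carried in `acc`, written back once per j)
def pvA_kloop (prev : List Int) (j : Int) (acc : Int) : List Int → Int
  | [] => acc
  | k :: rest =>
      if j ≥ k then pvA_kloop prev j (acc + prev.getD (j - k).toNat 0) rest
      else acc

-- `for i in range(1, s+1): if i > 9: break; dp[1][i] = 1`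
def pvA_loop1 (dp : List (List Int)) : List Int → List (List Int)
  | [] => dp
  | i :: rest =>
      if i > 9 then dp
      else pvA_loop1 (dp.set 1 ((dp.getD 1 []).set i.toNat 1)) rest

-- `for j in range(1, s+1): …` (indices in range under Pre_, so getD/set are exact)
def pvA_jloop (dp : List (List Int)) (i : Int) : List Int → List (List Int)
  | [] => dp
  | j :: rest =>
      let v := pvA_kloop (dp.getD (i - 1).toNat []) j ((dp.getD i.toNat []).getD j.toNat 0)
        (PySem.List.pyRange 0 10 1)
      pvA_jloop (dp.set i.toNat ((dp.getD i.toNat []).set j.toNat v)) i rest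

-- `for i in range(2, n+1): …`
def pvA_iloop (dp : List (List Int)) (s : Int) : List Int → List (List Int)
  | [] => dp
  | i :: rest => pvA_iloop (pvA_jloop dp i (PySem.List.pyRange 1 (s + 1) 1)) s rest

def countDigitToSum (n : Int) (s : Int) : Int :=
  if n * 9 < s ∨ s = 0 then 0
  else
    let dp0 := List.replicate (n + 1).toNat (List.replicate (s + 1).toNat (0 : Int))
    let dp1 := pvA_loop1 dp0 (PySem.List.pyRange 1 (s + 1) 1)
    let dp2 := pvA_iloop dp1 s (PySem.List.pyRange 2 (n + 1) 1)
    (dp2.getD n.toNat []).getD s.toNat 0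

-- ===== PORT B =====
-- `pref = [0]; for x in row: pref.append(pref[-1] + x)`  (running total carried in `acc`)
def pvB_prefAux (acc : Int) : List Int → List Int
  | [] => []
  | x :: r => (acc + x) :: pvB_prefAux (acc + x) r

def pvB_pref (row : List Int) : List Int := 0 :: pvB_prefAux 0 row

-- `row = [pref[j+1] - pref[max(0, j-9)] for j in range(s+1)]`
def pvB_step (s : Int) (row : List Int) : List Int :=
  let pref := pvB_pref row
  (PySem.List.pyRange 0 (s + 1) 1).map
    (fun j => pref.getD (j + 1).toNat 0 - pref.getD (max 0 (j - 9)).toNat 0)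

-- `for _ in range(n - 1): …`
def pvB_iter (s : Int) (row : List Int) : Nat → List Int
  | 0 => row
  | t + 1 => pvB_iter s (pvB_step s row) t

def countDigitToSum_alt (n : Int) (s : Int) : Int :=
  if n ≤ 0 ∨ s ≤ 0 ∨ 9 * n < s then 0
  else
    let row0 := 0 :: (List.replicate (min 9 s).toNat (1 : Int) ++
                      List.replicate (max 0 (s - 9)).toNat (0 : Int))
    let fin := pvB_iter s row0 (n - 1).toNat
    fin.getD s.toNat 0

-- ===== PRECONDITION & SPEC =====
-- Pre_ excludes exactly the inputs where Python A raises IndexError (s < 0 while the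
-- `n * 9 < s` guard does not fire): there dp's rows are empty and dp[n][s] is out of range.
def Pre_countDigitToSum (n : Int) (s : Int) : Prop := 0 ≤ s ∨ n * 9 < s
instance (n : Int) (s : Int) : Decidable (Pre_countDigitToSum n s) := by
  unfold Pre_countDigitToSum; infer_instance

def pvWitness_countDigitToSum : Int × Int := (3, 5)

def Spec_countDigitToSum (n : Int) (s : Int) (out : Int) : Prop := out = countDigitToSum_alt n s
instance (n : Int) (s : Int) (out : Int) : Decidable (Spec_countDigitToSum n s out) := by
  unfold Spec_countDigitToSum; infer_instance

-- ===== CLAIM (what is proved, stated in full; the proofs are below) =====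
def Claim_equal_countDigitToSum : Prop := ∀ (n : Int) (s : Int), Dom_countDigitToSum n s → Pre_countDigitToSum n s → Spec_countDigitToSum n s (countDigitToSum n s)

-- ===== LEMMAS AND PROOFS =====

def pvF (sn : Nat) : Nat → Nat → Int
  | 0, j => if 1 ≤ j ∧ j ≤ 9 ∧ j ≤ sn then 1 else 0
  | t + 1, j =>
      if j ≤ sn then ∑ k ∈ Finset.range 10, (if k ≤ j then pvF sn t (j - k) else 0) else 0

lemma pvF_zero (sn : Nat) : ∀ t, pvF sn t 0 = 0 := by
  intro t
  induction t with
  | zero => simp [pvF]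
  | succ t ih =>
      simp only [pvF, Nat.zero_le, if_true, Nat.le_zero, Nat.zero_sub]
      rw [Finset.sum_eq_zero]
      intro k hk
      split_ifs with h
      · subst h; simpa using ih
      · rfl

lemma getD_set_eq {α : Type} (xs : List α) (a b : Nat) (v d : α) :
    (xs.set a v).getD b d = if a = b ∧ b < xs.length then v else xs.getD b d := by
  by_cases h : a = b ∧ b < xs.length
  · rcases h with ⟨rfl, hb⟩
    simp [List.getD, hb]
  · rw [if_neg h]
    push_neg at h
    by_cases hab : a = b
    · subst hab
      have : xs.length ≤ a := by omega
      simp [List.getD, Nat.not_lt.mpr this]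
    · simp [List.getD, List.getElem?_set_ne hab]

lemma getD_rep0 (m t : Nat) : (List.replicate m (0 : Int)).getD t 0 = 0 := by
  rcases Nat.lt_or_ge t m with h | h
  · rw [List.getD_replicate]; exact h
  · rw [List.getD_eq_default _ _ (by simpa using h)]

lemma take_sum (l : List Int) : ∀ b, (l.take b).sum = ∑ t ∈ Finset.range b, l.getD t 0 := by
  intro b
  induction b with
  | zero => simp
  | succ b ih =>
      rw [Finset.sum_range_succ, ← ih, List.take_succ]
      cases h : l[b]? <;> simp [List.getD, h]

lemma pvCrux (g : Nat → Int) (j : Nat) :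
    (∑ t ∈ Finset.Ico (j - 9) (j + 1), g t) =
    ∑ k ∈ Finset.range 10, (if k ≤ j then g (j - k) else 0) := by
  rw [← Finset.sum_filter]
  symm
  refine Finset.sum_nbij' (i := fun k => j - k) (j := fun t => j - t) ?_ ?_ ?_ ?_ ?_
  · intro a ha
    simp only [Finset.mem_filter, Finset.mem_range] at ha
    simp only [Finset.mem_Ico]
    omega
  · intro t ht
    simp only [Finset.mem_Ico] at ht
    simp only [Finset.mem_filter, Finset.mem_range]
    omega
  · intro a ha
    simp only [Finset.mem_filter, Finset.mem_range] at ha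
    show j - (j - a) = a
    omega
  · intro t ht
    simp only [Finset.mem_Ico] at ht
    show j - (j - t) = t
    omega
  · intro a _
    rfl

lemma kloop_list (prev : List Int) (j : Int) :
    ∀ (l : List Int) (acc : Int), l.Pairwise (· ≤ ·) →
    pvA_kloop prev j acc l =
      acc + (l.map (fun k => if k ≤ j then prev.getD (j - k).toNat 0 else 0)).sum := by
  intro l
  induction l with
  | nil => intro acc _; simp [pvA_kloop]
  | cons k rest ih =>
      intro acc hp
      rcases List.pairwise_cons.mp hp with ⟨hall, htail⟩
      by_cases h : k ≤ j
      · rw [show pvA_kloop prev j acc (k :: rest)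
            = pvA_kloop prev j (acc + prev.getD (j - k).toNat 0) rest from by
              simp [pvA_kloop, ge_iff_le, h]]
        rw [ih _ htail]
        simp [h]
        ring
      · rw [show pvA_kloop prev j acc (k :: rest) = acc from by
              simp [pvA_kloop, ge_iff_le, h]]
        rw [List.map_cons, List.sum_cons, if_neg h]
        rw [List.sum_eq_zero, ]
        · ring
        · intro x hx
          rcases List.mem_map.mp hx with ⟨k', hk', rfl⟩
          rw [if_neg]
          intro hk'j
          exact h (le_trans (hall k' hk') hk'j)

lemma pyRange10 : PySem.List.pyRange 0 10 1 = [0,1,2,3,4,5,6,7,8,9] := by decide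

lemma cast_term (prev : List Int) (kn jn : Nat) :
    (if (kn : Int) ≤ (jn : Int) then prev.getD (((jn : Int) - (kn : Int)).toNat) 0 else 0)
    = (if kn ≤ jn then prev.getD (jn - kn) 0 else 0) := by
  by_cases h : kn ≤ jn
  · rw [if_pos (by exact_mod_cast h), if_pos h]
    congr 1
    omega
  · rw [if_neg (by exact_mod_cast h), if_neg h]

lemma kloop_val (prev : List Int) (jn : Nat) (acc : Int) :
    pvA_kloop prev (jn : Int) acc (PySem.List.pyRange 0 10 1) =
      acc + ∑ k ∈ Finset.range 10, (if k ≤ jn then prev.getD (jn - k) 0 else 0) := by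
  rw [pyRange10, kloop_list prev _ _ _ (by decide)]
  congr 1
  rw [show (10 : Nat) = 9+1 from rfl]
  simp only [Finset.sum_range_succ, Finset.sum_range_zero, List.map_cons, List.map_nil,
    List.sum_cons, List.sum_nil]
  have h0 := cast_term prev 0 jn
  have h1 := cast_term prev 1 jn
  have h2 := cast_term prev 2 jn
  have h3 := cast_term prev 3 jn
  have h4 := cast_term prev 4 jn
  have h5 := cast_term prev 5 jn
  have h6 := cast_term prev 6 jn
  have h7 := cast_term prev 7 jn
  have h8 := cast_term prev 8 jn
  have h9 := cast_term prev 9 jn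
  push_cast at h0 h1 h2 h3 h4 h5 h6 h7 h8 h9
  rw [h0, h1, h2, h3, h4, h5, h6, h7, h8, h9]
  ring

lemma loop1_len (l : List Int) (dp : List (List Int)) :
    (pvA_loop1 dp l).length = dp.length := by
  induction l generalizing dp with
  | nil => rfl
  | cons i rest ih =>
      simp only [pvA_loop1]
      split
      · rfl
      · rw [ih]; simp

lemma loop1_pt (l : List Int) (dp : List (List Int)) (r j : Nat)
    (hs : l.Pairwise (· < ·)) (h1 : ∀ x ∈ l, 1 ≤ x) :
    ((pvA_loop1 dp l).getD r []).getD j 0 =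
      if r = 1 ∧ (j : Int) ∈ l ∧ j ≤ 9 ∧ j < (dp.getD 1 []).length then 1
      else (dp.getD r []).getD j 0 := by
  induction l generalizing dp with
  | nil => simp [pvA_loop1]
  | cons i rest ih =>
      rcases List.pairwise_cons.mp hs with ⟨hall, htail⟩
      have hi1 : 1 ≤ i := h1 i (by simp)
      simp only [pvA_loop1]
      by_cases hbig : i > 9
      · rw [if_pos hbig, if_neg]
        rintro ⟨-, hmem, hj9, -⟩
        rcases List.mem_cons.mp hmem with h | h
        · omega
        · have := hall _ h; omega
      · rw [if_neg hbig]
        set row1 := dp.getD 1 []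
        set dp' := dp.set 1 (row1.set i.toNat 1) with hdp'
        have hrow' : dp'.getD 1 [] = if 1 < dp.length then row1.set i.toNat 1 else row1 := by
          rw [hdp', getD_set_eq]
          by_cases h : 1 < dp.length
          · rw [if_pos ⟨rfl, h⟩, if_pos h]
          · rw [if_neg (by tauto), if_neg h]

        have hlen' : (dp'.getD 1 []).length = row1.length := by
          rw [hrow']; split <;> simp
        rw [ih dp' htail (fun x hx => h1 x (List.mem_cons_of_mem _ hx))]
        by_cases hr : r = 1
        · subst hr
          rw [hlen']
          by_cases hjL : j < row1.length
          · -- row1 nonempty so dp.length > 1? no: row1 = dp.getD 1 could be [] if dp.length ≤ 1, then hjL false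
            have hdplen : 1 < dp.length := by
              by_contra hcon
              have hnil : row1 = [] := by
                show dp.getD 1 [] = []
                rcases dp with _ | ⟨x, t⟩
                · rfl
                · have : t = [] := by simpa using hcon
                  subst this; rfl
              rw [hnil] at hjL; simp at hjL
            have hrow'' : dp'.getD 1 [] = row1.set i.toNat 1 := by rw [hrow', if_pos hdplen]
            rw [hrow'', getD_set_eq]
            by_cases hji : (j : Int) = i
            · have hji' : i.toNat = j := by omega
              have hj9 : j ≤ 9 := by omega
              have hnotr : ¬ (1 = 1 ∧ (↑j : Int) ∈ rest ∧ j ≤ 9 ∧ j < row1.length) := by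
                rintro ⟨-, hmem, -, -⟩
                have := hall _ hmem
                omega
              rw [if_neg hnotr, if_pos ⟨hji', hjL⟩,
                if_pos (⟨rfl, by simp [hji], hj9, hjL⟩ :
                  1 = 1 ∧ (↑j : Int) ∈ i :: rest ∧ j ≤ 9 ∧ j < row1.length)]
            · have hji' : ¬ (i.toNat = j ∧ j < row1.length) := by
                rintro ⟨h, -⟩; omega
              rw [if_neg hji']
              congr 1
              simp [List.mem_cons, hji]
          · rw [if_neg (by rintro ⟨-,-,-,h⟩; exact hjL h), if_neg (by rintro ⟨-,-,-,h⟩; exact hjL h)]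
            have : ¬ (i.toNat = j ∧ j < row1.length) := by rintro ⟨-, h⟩; exact hjL h
            rw [hrow']
            split
            · rw [getD_set_eq, if_neg this]
            · rfl
        · rw [if_neg (by tauto), if_neg (by tauto)]
          rw [hdp', getD_set_eq]
          rw [if_neg (by rintro ⟨h, -⟩; exact hr h.symm)]

lemma jloop_len (i : Int) (l : List Int) (dp : List (List Int)) :
    (pvA_jloop dp i l).length = dp.length := by
  induction l generalizing dp with
  | nil => rfl
  | cons j rest ih => simp only [pvA_jloop]; rw [ih]; simp

lemma jloop_other (i : Int) (l : List Int) (dp : List (List Int)) (r : Nat) (hr : r ≠ i.toNat) :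
    (pvA_jloop dp i l).getD r [] = dp.getD r [] := by
  induction l generalizing dp with
  | nil => rfl
  | cons j rest ih =>
      simp only [pvA_jloop]
      rw [ih]
      rw [getD_set_eq]
      rw [if_neg (by rintro ⟨h, -⟩; exact hr h.symm)]

lemma jloop_pt (i : Int) (hi : 2 ≤ i) :
    ∀ (l : List Int) (dp : List (List Int)) (r j : Nat), l.Pairwise (· < ·) → (∀ x ∈ l, 1 ≤ x) →
    ((pvA_jloop dp i l).getD r []).getD j 0 =
      if r = i.toNat ∧ (j : Int) ∈ l ∧ j < (dp.getD i.toNat []).length then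
        (dp.getD i.toNat []).getD j 0 +
          ∑ k ∈ Finset.range 10, (if k ≤ j then (dp.getD (i.toNat - 1) []).getD (j - k) 0 else 0)
      else (dp.getD r []).getD j 0 := by
  intro l
  induction l with
  | nil => intro dp r j _ _; simp [pvA_jloop]
  | cons j0 rest ih =>
      intro dp r j hs h1
      rcases List.pairwise_cons.mp hs with ⟨hall, htail⟩
      have hj01 : 1 ≤ j0 := h1 j0 (by simp)
      simp only [pvA_jloop]
      set rowi := dp.getD i.toNat [] with hrowi
      set prev := dp.getD (i - 1).toNat [] with hprev
      have hj0n : j0 = ((j0.toNat : Nat) : Int) := by omega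
      set v := pvA_kloop prev j0 (rowi.getD j0.toNat 0) (PySem.List.pyRange 0 10 1) with hv
      set dp' := dp.set i.toNat (rowi.set j0.toNat v) with hdp'
      -- facts about dp'
      have hne : i.toNat ≠ (i - 1).toNat := by omega
      have hpe : prev = dp.getD (i.toNat - 1) [] := by
        rw [hprev]; congr 1; omega
      have hprev' : dp'.getD (i.toNat - 1) [] = dp.getD (i.toNat - 1) [] := by
        rw [hdp', getD_set_eq, if_neg (by rintro ⟨h, -⟩; omega)]
      have hrowi' : dp'.getD i.toNat [] = if i.toNat < dp.length then rowi.set j0.toNat v else rowi := by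
        rw [hdp', getD_set_eq]
        by_cases h : i.toNat < dp.length
        · rw [if_pos ⟨rfl, h⟩, if_pos h]
        · rw [if_neg (by tauto), if_neg h]
      have hleni' : (dp'.getD i.toNat []).length = rowi.length := by
        rw [hrowi']; split <;> simp
      rw [ih dp' r j htail (fun x hx => h1 x (List.mem_cons_of_mem _ hx))]
      rw [hprev', hleni']
      by_cases hr : r = i.toNat
      · subst hr
        by_cases hjL : j < rowi.length
        · have hdplen : i.toNat < dp.length := by
            by_contra hcon
            have hnil : rowi = [] := by
              rw [hrowi, List.getD, List.getElem?_eq_none (by omega), Option.getD_none]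
            rw [hnil] at hjL; simp at hjL
          have hrow2 : dp'.getD i.toNat [] = rowi.set j0.toNat v := by
            rw [hrowi', if_pos hdplen]
          by_cases hjj0 : (j : Int) = j0
          · -- this is the element being written now; rest does not contain it
            have hj0t : j0.toNat = j := by omega
            have hnotr : ¬ ((i.toNat = i.toNat) ∧ (↑j : Int) ∈ rest ∧ j < rowi.length) := by
              rintro ⟨-, hmem, -⟩
              have := hall _ hmem
              omega
            rw [if_neg hnotr, hrow2, getD_set_eq, if_pos ⟨hj0t, hjL⟩,
              if_pos (⟨rfl, by simp [hjj0], hjL⟩ :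
                i.toNat = i.toNat ∧ (↑j : Int) ∈ j0 :: rest ∧ j < rowi.length)]
            rw [hv, hj0n, kloop_val, hj0t]
            rw [hpe, Int.toNat_natCast]
          · have hset : (dp'.getD i.toNat []).getD j 0 = rowi.getD j 0 := by
              rw [hrow2, getD_set_eq, if_neg (by rintro ⟨h, -⟩; omega)]
            rw [hset]
            have hmem : ((↑j : Int) ∈ rest) ↔ ((↑j : Int) ∈ j0 :: rest) := by
              simp [List.mem_cons, hjj0]
            by_cases hmr : (↑j : Int) ∈ rest
            · rw [if_pos ⟨rfl, hmr, hjL⟩, if_pos ⟨rfl, hmem.mp hmr, hjL⟩]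
            · rw [if_neg (by tauto), if_neg (by rw [← hmem] at *; tauto)]
        · rw [if_neg (by rintro ⟨-, -, h⟩; exact hjL h), if_neg (by rintro ⟨-, -, h⟩; exact hjL h)]
          rw [hrowi']
          split
          · rw [getD_set_eq, if_neg (by rintro ⟨-, h⟩; exact hjL h)]
          · rfl
      · rw [if_neg (by tauto), if_neg (by tauto)]
        rw [hdp', getD_set_eq, if_neg (by rintro ⟨h, -⟩; exact hr h.symm)]

lemma iloop_pt (sn nn : Nat) (hsn : 1 ≤ sn) (hnn : 1 ≤ nn) :
    ∀ (cnt a : Nat) (dp : List (List Int)), 1 ≤ a → a + cnt = nn →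
    dp.length = nn + 1 →
    (∀ j, (dp.getD a []).getD j 0 = pvF sn (a - 1) j) →
    (∀ r, a < r → r ≤ nn → dp.getD r [] = List.replicate (sn + 1) 0) →
    ∀ j, ((pvA_iloop dp (sn : Int) (PySem.List.pyRange ((a : Int) + 1) ((nn : Int) + 1) 1)).getD nn []).getD j 0
      = pvF sn (nn - 1) j := by
  intro cnt
  induction cnt with
  | zero =>
      intro a dp ha hcnt hlen hrow hrep j
      obtain rfl : a = nn := by omega
      rw [PySem.List.pyRange_one_eq_nil (by omega)]
      exact hrow j
  | succ cnt ih =>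
      intro a dp ha hcnt hlen hrow hrep j
      have hlt : a < nn := by omega
      rw [PySem.List.pyRange_one_cons (by push_cast; omega)]
      show ((pvA_iloop (pvA_jloop dp ((a : Int) + 1) (PySem.List.pyRange 1 ((sn : Int) + 1) 1))
        (sn : Int) (PySem.List.pyRange ((a : Int) + 1 + 1) ((nn : Int) + 1) 1)).getD nn []).getD j 0
        = pvF sn (nn - 1) j
      set i : Int := (a : Int) + 1 with hidef
      have hit : i.toNat = a + 1 := by omega
      set dp' := pvA_jloop dp i (PySem.List.pyRange 1 ((sn : Int) + 1) 1) with hdp'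
      have hrepl : dp.getD (a + 1) [] = List.replicate (sn + 1) 0 := hrep (a + 1) (by omega) (by omega)
      have hrow' : ∀ j', (dp'.getD (a + 1) []).getD j' 0 = pvF sn a j' := by
        intro j'
        rw [hdp', jloop_pt i (by omega) _ dp (a + 1) j'
          (PySem.List.pairwise_lt_pyRange_one _ _)
          (fun x hx => ((PySem.List.mem_pyRange_one).mp hx).1)]
        rw [hit, hrepl]
        obtain ⟨a', rfl⟩ : ∃ a', a = a' + 1 := ⟨a - 1, by omega⟩
        show _ = pvF sn (a' + 1) j'
        split_ifs with hcond
        · obtain ⟨-, hmem, -⟩ := hcond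
          rw [PySem.List.mem_pyRange_one] at hmem
          have hj1 : 1 ≤ j' ∧ j' ≤ sn := by constructor <;> omega
          rw [getD_rep0]
          simp only [pvF]
          rw [if_pos hj1.2, zero_add]
          simp only [Nat.add_sub_cancel]
          apply Finset.sum_congr rfl
          intro k _
          split
          · rw [hrow, Nat.add_sub_cancel]
          · rfl
        · rw [getD_rep0]
          by_cases hz : j' = 0
          · rw [hz, pvF_zero]
          · have hbig : sn < j' := by
              by_contra hsmall
              apply hcond
              refine ⟨rfl, ?_, by rw [List.length_replicate]; omega⟩
              rw [PySem.List.mem_pyRange_one]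
              constructor
              · exact_mod_cast Nat.one_le_iff_ne_zero.mpr hz
              · push_cast; omega
            simp only [pvF]
            rw [if_neg (by omega)]
      have hrep' : ∀ r, a + 1 < r → r ≤ nn → dp'.getD r [] = List.replicate (sn + 1) 0 := by
        intro r h1 h2
        rw [hdp', jloop_other _ _ _ _ (by omega)]
        exact hrep r (by omega) h2
      have hfin := ih (a + 1) dp' (by omega) (by omega)
        (by rw [hdp', jloop_len]; exact hlen) (by
          intro j''
          rw [show a + 1 - 1 = a from rfl]
          exact hrow' j'') hrep' j
      convert hfin using 4

lemma prefAux_getD (row : List Int) : ∀ (t : Nat) (acc : Int), t < row.length →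
    (pvB_prefAux acc row).getD t 0 = acc + (row.take (t + 1)).sum := by
  induction row with
  | nil => intro t acc h; simp at h
  | cons x r ih =>
      intro t acc h
      cases t with
      | zero => simp [pvB_prefAux, List.getD]
      | succ t =>
          have := ih t (acc + x) (by simpa using h)
          simp only [pvB_prefAux, List.getD_cons_succ] at *
          rw [this, List.take_succ_cons, List.sum_cons]
          ring

lemma pref_getD (row : List Int) (t : Nat) (ht : t ≤ row.length) :
    (pvB_pref row).getD t 0 = (row.take t).sum := by
  cases t with
  | zero => simp [pvB_pref, List.getD]
  | succ t =>
      show (pvB_prefAux 0 row).getD t 0 = _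
      rw [prefAux_getD row t 0 (by omega), zero_add]

lemma step_len (sn : Nat) (row : List Int) : (pvB_step (sn : Int) row).length = sn + 1 := by
  simp [pvB_step, PySem.List.length_pyRange_one]

lemma step_pt (sn : Nat) (row : List Int) (hlen : row.length = sn + 1) (j : Nat) :
    (pvB_step (sn : Int) row).getD j 0 =
      if j ≤ sn then ∑ k ∈ Finset.range 10, (if k ≤ j then row.getD (j - k) 0 else 0) else 0 := by
  by_cases hj : j ≤ sn
  · rw [if_pos hj]
    have hget : (pvB_step (sn : Int) row).getD j 0 =
        (pvB_pref row).getD ((j : Int) + 1).toNat 0 -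
        (pvB_pref row).getD (max 0 ((j : Int) - 9)).toNat 0 := by
      have hcast : ((sn : Int) + 1) = ((sn + 1 : Nat) : Int) := by push_cast; ring
      rw [pvB_step, List.getD, hcast, PySem.List.getElem?_map_pyRange_zero _ _ _ (by omega)]
      rfl
    rw [hget]
    have h1 : ((j : Int) + 1).toNat = j + 1 := by omega
    have h2 : (max 0 ((j : Int) - 9)).toNat = j - 9 := by omega
    rw [h1, h2, pref_getD row (j + 1) (by omega), pref_getD row (j - 9) (by omega)]
    rw [take_sum, take_sum, ← Finset.sum_Ico_eq_sub _ (show j - 9 ≤ j + 1 by omega)]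
    exact pvCrux (fun t => row.getD t 0) j
  · rw [if_neg hj]
    rw [List.getD_eq_default]
    rw [step_len]
    omega

lemma row0_len (sn : Nat) (hsn : 1 ≤ sn) :
    ((0 : Int) :: (List.replicate (min 9 (sn : Int)).toNat (1 : Int) ++
      List.replicate (max 0 ((sn : Int) - 9)).toNat (0 : Int))).length = sn + 1 := by
  simp only [List.length_cons, List.length_append, List.length_replicate]
  omega

lemma row0_pt (sn : Nat) (hsn : 1 ≤ sn) (j : Nat) :
    ((0 : Int) :: (List.replicate (min 9 (sn : Int)).toNat (1 : Int) ++
      List.replicate (max 0 ((sn : Int) - 9)).toNat (0 : Int))).getD j 0 = pvF sn 0 j := by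
  have hm : (min 9 (sn : Int)).toNat = min 9 sn := by omega
  have hx : (max 0 ((sn : Int) - 9)).toNat = sn - 9 := by omega
  rw [hm, hx]
  cases j with
  | zero => simp [List.getD, pvF]
  | succ j =>
      rw [List.getD_cons_succ]
      show _ = pvF sn 0 (j + 1)
      simp only [pvF]
      by_cases h1 : j < min 9 sn
      · have hv : (List.replicate (min 9 sn) (1 : Int)).getD j 0 = 1 := by
          simp [List.getD, List.getElem?_replicate, h1]
        rw [List.getD_append _ _ _ _ (by simpa using h1), hv, if_pos (by omega)]
      · have h1' : (List.replicate (min 9 sn) (1 : Int)).length ≤ j := by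
          simp only [List.length_replicate]; omega
        rw [List.getD_append_right _ _ _ _ h1']
        simp only [List.length_replicate]
        by_cases h2 : j - min 9 sn < sn - 9
        · have hv : (List.replicate (sn - 9) (0 : Int)).getD (j - min 9 sn) 0 = 0 := by
            simp [List.getD, List.getElem?_replicate, h2]
          rw [hv, if_neg (by omega)]
        · rw [List.getD_eq_default _ _ (by simp only [List.length_replicate]; omega),
            if_neg (by omega)]

lemma iter_pt (sn : Nat) : ∀ (c t : Nat) (row : List Int), row.length = sn + 1 →
    (∀ j, row.getD j 0 = pvF sn t j) →
    ∀ j, (pvB_iter (sn : Int) row c).getD j 0 = pvF sn (t + c) j := by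
  intro c
  induction c with
  | zero => intro t row _ hrow j; exact hrow j
  | succ c ih =>
      intro t row hlen hrow j
      show (pvB_iter (sn : Int) (pvB_step (sn : Int) row) c).getD j 0 = _
      have hstep : ∀ j', (pvB_step (sn : Int) row).getD j' 0 = pvF sn (t + 1) j' := by
        intro j'
        rw [step_pt sn row hlen j']
        show _ = pvF sn (t + 1) j'
        simp only [pvF]
        split_ifs with h
        · apply Finset.sum_congr rfl
          intro k _
          split
          · rw [hrow]
          · rfl
        · rfl
      have := ih (t + 1) (pvB_step (sn : Int) row) (step_len sn row) hstep j
      rw [this]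
      congr 1
      omega

lemma loop1_other (l : List Int) (dp : List (List Int)) (r : Nat) (hr : r ≠ 1) :
    (pvA_loop1 dp l).getD r [] = dp.getD r [] := by
  induction l generalizing dp with
  | nil => rfl
  | cons i rest ih =>
      simp only [pvA_loop1]
      split
      · rfl
      · rw [ih, getD_set_eq, if_neg (by rintro ⟨h, -⟩; exact hr h.symm)]

lemma getD_rep_row (m t : Nat) (x : List Int) (h : t < m) :
    (List.replicate m x).getD t [] = x := by
  simp [List.getD, List.getElem?_replicate, h]

-- ===== VERDICT (by name: the statement is the Claim_ definition above) =====
theorem countDigitToSum_spec : Claim_equal_countDigitToSum := by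
  intro n s _ hpre
  unfold Spec_countDigitToSum countDigitToSum countDigitToSum_alt
  by_cases hguard : n * 9 < s ∨ s = 0
  · rw [if_pos hguard]
    have hb : n ≤ 0 ∨ s ≤ 0 ∨ 9 * n < s := by
      rcases hguard with h | h
      · rcases (by omega : s ≤ 0 ∨ 0 < s) with h2 | h2
        · exact Or.inr (Or.inl h2)
        · exact Or.inr (Or.inr (by omega))
      · exact Or.inr (Or.inl (by omega))
    rw [if_pos hb]
  · have hng : ¬ (n * 9 < s) ∧ s ≠ 0 := by tauto
    have hs1 : 1 ≤ s := by
      rcases hpre with h | h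
      · rcases hng with ⟨-, h2⟩; omega
      · exact absurd h hng.1
    have hn1 : 1 ≤ n := by have := hng.1; omega
    rw [if_neg hguard, if_neg (by
      have h1 := hng.1
      push_neg
      refine ⟨by omega, by omega, by omega⟩)]
    obtain ⟨sn, rfl⟩ : ∃ sn : Nat, s = (sn : Int) := ⟨s.toNat, by omega⟩
    obtain ⟨nn, rfl⟩ : ∃ nn : Nat, n = (nn : Int) := ⟨n.toNat, by omega⟩
    have hsn : 1 ≤ sn := by omega
    have hnn : 1 ≤ nn := by omega
    -- A side
    have hts : ((sn : Int) + 1).toNat = sn + 1 := by omega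
    have htn : ((nn : Int) + 1).toNat = nn + 1 := by omega
    have htns : (nn : Int).toNat = nn := by omega
    have htss : (sn : Int).toNat = sn := by omega
    rw [hts, htn, htns, htss]
    set dp0 := List.replicate (nn + 1) (List.replicate (sn + 1) (0 : Int)) with hdp0
    set dp1 := pvA_loop1 dp0 (PySem.List.pyRange 1 ((sn : Int) + 1) 1) with hdp1
    have hrow1len : dp0.getD 1 [] = List.replicate (sn + 1) 0 :=
      getD_rep_row _ _ _ (by omega)
    have hdp1row : ∀ j, (dp1.getD 1 []).getD j 0 = pvF sn 0 j := by
      intro j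
      rw [hdp1, loop1_pt _ _ 1 j (PySem.List.pairwise_lt_pyRange_one _ _)
        (fun x hx => ((PySem.List.mem_pyRange_one).mp hx).1)]
      rw [hrow1len]
      simp only [List.length_replicate]
      by_cases hc : 1 ≤ j ∧ j ≤ 9 ∧ j ≤ sn
      · rw [if_pos ⟨by trivial, by rw [PySem.List.mem_pyRange_one]; push_cast; omega, by omega, by omega⟩]
        show (1 : Int) = pvF sn 0 j
        simp only [pvF]
        rw [if_pos hc]
      · rw [if_neg (by
          rintro ⟨-, hmem, hj9, hjL⟩
          rw [PySem.List.mem_pyRange_one] at hmem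
          push_cast at hmem
          omega)]
        rw [getD_rep0]
        show (0 : Int) = pvF sn 0 j
        simp only [pvF]
        rw [if_neg hc]
    have hdp1rep : ∀ r, 1 < r → r ≤ nn → dp1.getD r [] = List.replicate (sn + 1) 0 := by
      intro r h1 h2
      rw [hdp1, loop1_other _ _ _ (by omega), hdp0, getD_rep_row _ _ _ (by omega)]
    have hdp1len : dp1.length = nn + 1 := by
      rw [hdp1, loop1_len, hdp0, List.length_replicate]
    have hA := iloop_pt sn nn hsn hnn (nn - 1) 1 dp1 (by omega) (by omega) hdp1len
      hdp1row hdp1rep sn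
    rw [show ((1 : Nat) : Int) + 1 = 2 by norm_num] at hA
    rw [hA]
    -- B side
    have hB := iter_pt sn (nn - 1) 0
      ((0 : Int) :: (List.replicate (min 9 (sn : Int)).toNat (1 : Int) ++
        List.replicate (max 0 ((sn : Int) - 9)).toNat (0 : Int)))
      (row0_len sn hsn) (row0_pt sn hsn) sn
    rw [show ((nn : Int) - 1).toNat = nn - 1 by omega, hB]
    rw [Nat.zero_add]
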